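-- pv_equiv track=rewrite | github.com/Educg550/document_reader | read_image_text.py | which_company
-- ===== SOURCE A (Python) =====
-- def which_company(text):
--   company_matches = {
--         'enel': {
--             'enel', 'enei', 'eletropaulo', 'eietropaulo', 'eletropauio', 'eietropauio', 'eletropau', 'eietropau',
--             'enl', 'eneel', 'ennel', 'enell', 'elletropaulo', 'eletropaullo', 'eletropaolo', 'eletrpaulo',
--             'eletropaul', 'eletroplauo', 'elrtopaulo', 'eletropalu', 'eletrp', 'elettrp', 'eletorp', 'elettrop',
--             'eneii', 'enniei', 'eneli', 'eneil'
--         },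
--         'cemig': {
--             'cemig', 'cemlg', 'cenig', 'cenlg',
--             'cemg', 'cemiig', 'cemigg', 'semig', 'cemigs',
--             'cemige', 'ceemig', 'cemeg', 'cemigee', 'semg',
--             'seemig', 'cemlg', 'cmig', 'cmigg', 'cemmigg',
--             'ceemlg', 'cenmg', 'cenmig', 'cenmigg'
--         }
--     }
--   words = set(word.lower() for word in text.split())
--   for company, matches in company_matches.items():
--     if words & matches:
--       return company
-- ===== SOURCE B (Python) =====
-- ENEL_WORDS = sorted([
--     'eietropau', 'eietropauio', 'eietropaulo', 'eletorp', 'eletropalu',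
--     'eletropaolo', 'eletropau', 'eletropauio', 'eletropaul', 'eletropaullo',
--     'eletropaulo', 'eletroplauo', 'eletrp', 'eletrpaulo', 'elettrop',
--     'elettrp', 'elletropaulo', 'elrtopaulo', 'eneel', 'enei',
--     'eneii', 'eneil', 'enel', 'eneli', 'enell',
--     'enl', 'ennel', 'enniei',
-- ])
-- CEMIG_WORDS = sorted([
--     'ceemig', 'ceemlg', 'cemeg', 'cemg', 'cemig',
--     'cemige', 'cemigee', 'cemigg', 'cemigs', 'cemiig',
--     'cemlg', 'cemmigg', 'cenig', 'cenlg', 'cenmg',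
--     'cenmig', 'cenmigg', 'cmig', 'cmigg', 'seemig',
--     'semg', 'semig',
-- ])
--
--
-- def which_company(text):
--     # one inverted index: keyword -> company name
--     index = {w: company
--              for company, keywords in (('enel', ENEL_WORDS), ('cemig', CEMIG_WORDS))
--              for w in keywords}
--     found = set()
--     for word in text.split():
--         company = index.get(word.lower())
--         if company is not None:
--             found.add(company)
--     if 'enel' in found:
--         return 'enel'
--     if 'cemig' in found:
--         return 'cemig'
--     return None
-- ===== Notes on version B (the rewrite author's own statement) =====
-- stated objective: idiomatic
-- what changed: Replaces the per-company set-intersection loop by one inverted-index dict keyword->company plus a single collecting pass over the words, resolving the enel-over-cemig priority after the pass.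
import Mathlib
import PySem

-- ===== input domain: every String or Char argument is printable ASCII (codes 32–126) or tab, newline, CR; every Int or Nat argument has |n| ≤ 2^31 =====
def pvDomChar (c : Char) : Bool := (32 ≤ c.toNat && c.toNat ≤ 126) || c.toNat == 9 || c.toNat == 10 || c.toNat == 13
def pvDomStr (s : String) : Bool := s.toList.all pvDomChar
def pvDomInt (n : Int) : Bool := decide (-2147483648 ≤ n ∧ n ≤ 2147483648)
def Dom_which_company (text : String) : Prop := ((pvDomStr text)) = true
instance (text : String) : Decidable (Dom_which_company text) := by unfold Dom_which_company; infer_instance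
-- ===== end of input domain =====

-- B is an idiomatic re-implementation: one inverted-index dict keyword->company, a single
-- collecting pass over the words, and the enel-over-cemig priority resolved afterwards.

-- the two keyword lists (shared data of both ports)
def enelWords : List String :=
  ["eietropau", "eietropauio", "eietropaulo", "eletorp", "eletropalu",
   "eletropaolo", "eletropau", "eletropauio", "eletropaul", "eletropaullo",
   "eletropaulo", "eletroplauo", "eletrp", "eletrpaulo", "elettrop",
   "elettrp", "elletropaulo", "elrtopaulo", "eneel", "enei",
   "eneii", "eneil", "enel", "eneli", "enell",
   "enl", "ennel", "enniei"]
def cemigWords : List String :=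
  ["ceemig", "ceemlg", "cemeg", "cemg", "cemig",
   "cemige", "cemigee", "cemigg", "cemigs", "cemiig",
   "cemlg", "cemmigg", "cenig", "cenlg", "cenmg",
   "cenmig", "cenmigg", "cmig", "cmigg", "seemig",
   "semg", "semig"]

-- ===== PORT A =====
-- the 'for company, matches in company_matches.items():' loop with its early return
def wcScan (words : PySem.Set String) : List (String × PySem.Set String) → Option String
  | [] => none
  | (company, ms) :: rest =>
      if PySem.Set.inter words ms ≠ [] then some company else wcScan words rest

def which_company (text : String) : Option String :=
  let companyMatches : List (String × PySem.Set String) :=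
    [("enel", PySem.Set.ofList enelWords), ("cemig", PySem.Set.ofList cemigWords)]
  let words : PySem.Set String :=
    PySem.Set.ofList ((PySem.Str.split₀ text).map PySem.Str.lower)
  wcScan words companyMatches

-- ===== PORT B =====
def wcIndex : PySem.Dict String String :=
  cemigWords.foldl (fun d w => d.insert w "cemig")
    (enelWords.foldl (fun d w => d.insert w "enel") PySem.Dict.empty)

def which_company_alt (text : String) : Option String :=
  let found : PySem.Set String :=
    (PySem.Str.split₀ text).foldl
      (fun s word =>
        match wcIndex.get? (PySem.Str.lower word) with
        | some company => PySem.Set.add s company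
        | none => s)
      PySem.Set.empty
  if "enel" ∈ found then some "enel"
  else if "cemig" ∈ found then some "cemig"
  else none

-- ===== PRECONDITION & SPEC =====
def Spec_which_company (text : String) (out : Option String) : Prop := out = which_company_alt text
instance (text : String) (out : Option String) : Decidable (Spec_which_company text out) := by unfold Spec_which_company; infer_instance

-- ===== CLAIM (what is proved, stated in full; the proofs are below) =====
def Claim_equal_which_company : Prop := ∀ (text : String), Dom_which_company text → Spec_which_company text (which_company text)

-- ===== LEMMAS AND PROOFS =====

-- lookup in a dict after a loop inserting a constant value for every key of a list
theorem wc_get?_foldl_insert_const (L : List String) (v : String)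
    (d : PySem.Dict String String) (w : String) :
    (L.foldl (fun d x => d.insert x v) d).get? w =
      if w ∈ L then some v else d.get? w := by
  induction L generalizing d with
  | nil => simp
  | cons a t ih =>
      simp only [List.foldl_cons, ih, PySem.Dict.get?_insert, List.mem_cons]
      by_cases h1 : w ∈ t <;> by_cases h2 : w = a <;> simp [h1, h2]

theorem wc_index_get? (w : String) :
    wcIndex.get? w =
      if w ∈ cemigWords then some "cemig"
      else if w ∈ enelWords then some "enel"
      else none := by
  unfold wcIndex
  rw [wc_get?_foldl_insert_const, wc_get?_foldl_insert_const]
  simp [PySem.Dict.get?_empty]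

theorem wc_disjoint : ∀ w ∈ enelWords, w ∉ cemigWords := by decide

-- membership in the 'found' set built by B's collecting pass
theorem wc_mem_found (c : String) (l : List String) (s : PySem.Set String) :
    c ∈ l.foldl
      (fun s word =>
        match wcIndex.get? (PySem.Str.lower word) with
        | some company => PySem.Set.add s company
        | none => s) s ↔
      c ∈ s ∨ ∃ w ∈ l, wcIndex.get? (PySem.Str.lower w) = some c := by
  induction l generalizing s with
  | nil => simp
  | cons a t ih =>
      simp only [List.foldl_cons]
      rcases h : wcIndex.get? (PySem.Str.lower a) with _ | v
      · rw [ih]; simp [h]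
      · rw [ih]
        simp only [PySem.Set.mem_add, List.mem_cons]
        constructor
        · rintro (⟨hs | hv⟩ | ⟨w, hw, hg⟩)
          · exact Or.inl hs
          · exact Or.inr ⟨a, Or.inl rfl, by rw [h, hv]⟩
          · exact Or.inr ⟨w, Or.inr hw, hg⟩
        · rintro (hs | ⟨w, rfl | hw, hg⟩)
          · exact Or.inl (Or.inl hs)
          · rw [h] at hg; exact Or.inl (Or.inr (Option.some_injective _ hg).symm)
          · exact Or.inr ⟨w, hw, hg⟩

-- A's 'words & matches' truthiness as an existential over the word list
theorem wc_inter_ne_nil (ws : List String) (M : List String) :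
    PySem.Set.inter (PySem.Set.ofList ws) (PySem.Set.ofList M) ≠ [] ↔
      ∃ w ∈ ws, w ∈ M := by
  rw [← List.isEmpty_eq_false_iff, List.isEmpty_eq_false_iff_exists_mem]
  constructor
  · rintro ⟨x, hx⟩
    rw [PySem.Set.mem_inter] at hx
    exact ⟨x, (PySem.Set.mem_ofList _ _).mp hx.1, (PySem.Set.mem_ofList _ _).mp hx.2⟩
  · rintro ⟨w, hw, hM⟩
    exact ⟨w, (PySem.Set.mem_inter _ _ _).mpr
      ⟨(PySem.Set.mem_ofList _ _).mpr hw, (PySem.Set.mem_ofList _ _).mpr hM⟩⟩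

theorem wc_get_enel (w : String) :
    wcIndex.get? w = some "enel" ↔ w ∈ enelWords := by
  rw [wc_index_get?]
  by_cases h1 : w ∈ cemigWords
  · simp [h1, show ¬ w ∈ enelWords from fun hE => wc_disjoint w hE h1]
  · by_cases h2 : w ∈ enelWords <;> simp [h1, h2]

theorem wc_get_cemig (w : String) :
    wcIndex.get? w = some "cemig" ↔ w ∈ cemigWords := by
  rw [wc_index_get?]
  by_cases h1 : w ∈ cemigWords
  · simp [h1]
  · by_cases h2 : w ∈ enelWords <;> simp [h1, h2]

-- ===== VERDICT (by name: the statement is the Claim_ definition above) =====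
set_option maxRecDepth 16384 in
theorem which_company_spec : Claim_equal_which_company := by
  intro text _
  unfold Spec_which_company
  have hBe : ("enel" ∈ (PySem.Str.split₀ text).foldl
      (fun s word =>
        match wcIndex.get? (PySem.Str.lower word) with
        | some company => PySem.Set.add s company
        | none => s) PySem.Set.empty) ↔
      ∃ w ∈ (PySem.Str.split₀ text).map PySem.Str.lower, w ∈ enelWords := by
    rw [wc_mem_found]
    simp only [PySem.Set.empty]
    simp [wc_get_enel]
  have hBc : ("cemig" ∈ (PySem.Str.split₀ text).foldl
      (fun s word =>
        match wcIndex.get? (PySem.Str.lower word) with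
        | some company => PySem.Set.add s company
        | none => s) PySem.Set.empty) ↔
      ∃ w ∈ (PySem.Str.split₀ text).map PySem.Str.lower, w ∈ cemigWords := by
    rw [wc_mem_found]
    simp only [PySem.Set.empty]
    simp [wc_get_cemig]
  show which_company text = which_company_alt text
  unfold which_company which_company_alt
  simp only [wcScan]
  by_cases he : ∃ w ∈ (PySem.Str.split₀ text).map PySem.Str.lower, w ∈ enelWords
  · rw [if_pos ((wc_inter_ne_nil _ _).mpr he), if_pos (hBe.mpr he)]
  · rw [if_neg (fun h => he ((wc_inter_ne_nil _ _).mp h)),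
        if_neg (fun h => he (hBe.mp h))]
    by_cases hc : ∃ w ∈ (PySem.Str.split₀ text).map PySem.Str.lower, w ∈ cemigWords
    · rw [if_pos ((wc_inter_ne_nil _ _).mpr hc), if_pos (hBc.mpr hc)]
    · rw [if_neg (fun h => hc ((wc_inter_ne_nil _ _).mp h)),
          if_neg (fun h => hc (hBc.mp h))]
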